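-- pv_equiv track=rewrite | github.com/thegostisdead/dna-message-protocol | encoder/encoder.py | ascii_to_dna_base
-- ===== SOURCE A (Python) =====
-- def ascii_to_dna_base(ascii_message_sequence):
-- 	def numberToBase(char):
-- 		if char == 0:
-- 			return [0]
-- 		digits = []
-- 		while char:
-- 			digits.append(int(char % 4))
-- 			char //= 4
-- 		return digits[::-1]
--
-- 	return [numberToBase(x) for x in ascii_message_sequence]
-- ===== SOURCE B (Python) =====
-- def ascii_to_dna_base(ascii_message_sequence):
-- 	def to_base4(x):
-- 		p = 1
-- 		while p * 4 <= x:
-- 			p *= 4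
-- 		digits = []
-- 		while p >= 1:
-- 			digits.append(int(x // p) % 4)
-- 			p //= 4
-- 		return digits
--
-- 	return [to_base4(x) for x in ascii_message_sequence]
-- ===== Notes on version B (the rewrite author's own statement) =====
-- stated objective: alternative
-- what changed: Instead of collecting least-significant digits with repeated %4 and //4 and reversing the list, B first finds the largest power of 4 not exceeding the number and then emits digits most-significant-first by dividing by descending powers, so no reversal and no zero special case are needed.
import Mathlib
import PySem

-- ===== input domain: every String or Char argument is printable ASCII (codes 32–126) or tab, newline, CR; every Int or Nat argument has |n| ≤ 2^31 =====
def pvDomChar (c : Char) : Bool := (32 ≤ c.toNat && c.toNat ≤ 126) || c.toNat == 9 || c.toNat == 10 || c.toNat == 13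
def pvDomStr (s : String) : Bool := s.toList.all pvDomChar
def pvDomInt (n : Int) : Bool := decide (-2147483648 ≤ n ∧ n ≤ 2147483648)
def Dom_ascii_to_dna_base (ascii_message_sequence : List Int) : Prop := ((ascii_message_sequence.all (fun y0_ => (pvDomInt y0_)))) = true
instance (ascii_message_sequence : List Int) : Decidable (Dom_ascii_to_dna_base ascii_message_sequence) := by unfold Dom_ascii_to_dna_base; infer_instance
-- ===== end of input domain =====

-- B replaces the LSB-first %4//4 loop + reverse by a largest-power-of-4 search followed by
-- MSB-first extraction with descending powers (no reversal, no zero case); alternative, same cost.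
-- Pre_ excludes negative entries, on which A's `while char:` loop never terminates.


-- ===== PORT A =====
-- the `while char:` loop; `if 0 < c` is the totality guard (on a negative entry the
-- Python loop never terminates — those inputs are excluded by Pre_ below; on 0 ≤ c it is exactly `while char:`)
def pvLoopA (c : Int) (digits : List Int) : List Int :=
  if h : 0 < c then pvLoopA (PySem.Int.floordiv c 4) (digits ++ [PySem.Int.mod c 4]) else digits
termination_by c.toNat
decreasing_by
  have := PySem.Int.floordiv_eq_ediv_of_pos (a := c) (b := 4) (by omega)
  rw [this]; omega

def pvNumberToBase (char : Int) : List Int :=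
  if char = 0 then [0]
  else (pvLoopA char []).reverse   -- digits[::-1]

def ascii_to_dna_base (ascii_message_sequence : List Int) : List (List Int) :=
  ascii_message_sequence.map pvNumberToBase

-- ===== PORT B =====
-- `while p * 4 <= x: p *= 4`; the `0 < p` conjunct is a totality guard only (p starts at 1 and only grows)
def pvPowB (x p : Int) : Int :=
  if h : p * 4 ≤ x ∧ 0 < p then pvPowB x (p * 4) else p
termination_by (x - p).toNat
decreasing_by omega

-- `while p >= 1: digits.append(int(x // p) % 4); p //= 4`
def pvLoopB (x p : Int) (digits : List Int) : List Int :=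
  if h : 1 ≤ p then
    pvLoopB x (PySem.Int.floordiv p 4) (digits ++ [PySem.Int.mod (PySem.Int.floordiv x p) 4])
  else digits
termination_by p.toNat
decreasing_by
  have := PySem.Int.floordiv_eq_ediv_of_pos (a := p) (b := 4) (by omega)
  rw [this]; omega

def pvToBase4 (x : Int) : List Int :=
  pvLoopB x (pvPowB x 1) []

def ascii_to_dna_base_alt (ascii_message_sequence : List Int) : List (List Int) :=
  ascii_message_sequence.map pvToBase4

-- ===== PRECONDITION & SPEC =====
-- Pre_ excludes lists with a negative entry: there A's `while char:` loop never terminates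
-- (char //= 4 stabilises at -1), so A returns no value on those inputs.
def Pre_ascii_to_dna_base (ascii_message_sequence : List Int) : Prop :=
  ∀ y ∈ ascii_message_sequence, 0 ≤ y
instance (ascii_message_sequence : List Int) : Decidable (Pre_ascii_to_dna_base ascii_message_sequence) := by unfold Pre_ascii_to_dna_base; infer_instance

def pvWitness_ascii_to_dna_base : List Int := [0, 65, 7]

def Spec_ascii_to_dna_base (ascii_message_sequence : List Int) (out : List (List Int)) : Prop := out = ascii_to_dna_base_alt ascii_message_sequence
instance (ascii_message_sequence : List Int) (out : List (List Int)) : Decidable (Spec_ascii_to_dna_base ascii_message_sequence out) := by unfold Spec_ascii_to_dna_base; infer_instance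

-- ===== CLAIM (what is proved, stated in full; the proofs are below) =====
def Claim_equal_ascii_to_dna_base : Prop := ∀ (ascii_message_sequence : List Int), Dom_ascii_to_dna_base ascii_message_sequence → Pre_ascii_to_dna_base ascii_message_sequence → Spec_ascii_to_dna_base ascii_message_sequence (ascii_to_dna_base ascii_message_sequence)

-- ===== LEMMAS AND PROOFS =====

-- A's digits, least-significant first
def lsbDigits (c : Int) : List Int :=
  if h : 0 < c then PySem.Int.mod c 4 :: lsbDigits (PySem.Int.floordiv c 4) else []
termination_by c.toNat
decreasing_by
  have := PySem.Int.floordiv_eq_ediv_of_pos (a := c) (b := 4) (by omega)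
  rw [this]; omega

lemma pvLoopA_eq (c : Int) (digits : List Int) :
    pvLoopA c digits = digits ++ lsbDigits c := by
  induction c, digits using pvLoopA.induct with
  | case1 c digits h ih =>
      rw [pvLoopA, dif_pos h, ih,
        show lsbDigits c = PySem.Int.mod c 4 :: lsbDigits (PySem.Int.floordiv c 4) from by
          rw [lsbDigits, dif_pos h]]
      simp
  | case2 c digits h =>
      rw [pvLoopA, dif_neg h, lsbDigits, dif_neg h]; simp

-- B's digits, most-significant first: [dig x m, …, dig x 0]
def descDigits (x : Int) : Nat → List Int
  | 0 => [PySem.Int.mod x 4]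
  | m + 1 => PySem.Int.mod (PySem.Int.floordiv x (4 ^ (m + 1))) 4 :: descDigits x m

lemma floordiv_pow_succ (x : Int) (i : Nat) :
    PySem.Int.floordiv x (4 ^ (i + 1)) = PySem.Int.floordiv (PySem.Int.floordiv x 4) (4 ^ i) := by
  rw [PySem.Int.floordiv_eq_ediv_of_pos (by positivity),
      PySem.Int.floordiv_eq_ediv_of_pos (by norm_num),
      PySem.Int.floordiv_eq_ediv_of_pos (by positivity)]
  rw [Int.ediv_ediv_of_nonneg (by norm_num), pow_succ']

lemma descDigits_succ (x : Int) (m : Nat) :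
    descDigits x (m + 1) = descDigits (PySem.Int.floordiv x 4) m ++ [PySem.Int.mod x 4] := by
  induction m with
  | zero =>
      simp [descDigits, pow_one]
  | succ m ih =>
      rw [descDigits, ih, descDigits, floordiv_pow_succ x (m + 1)]
      rfl

lemma pvLoopB_pow (x : Int) (m : Nat) (digits : List Int) :
    pvLoopB x ((4 : Int) ^ m) digits = digits ++ descDigits x m := by
  induction m generalizing digits with
  | zero =>
      rw [pow_zero, pvLoopB, dif_pos (by norm_num),
        show PySem.Int.floordiv (1 : Int) 4 = 0 from by decide,
        pvLoopB, dif_neg (by norm_num), descDigits,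
        show PySem.Int.floordiv x 1 = x from by
          rw [PySem.Int.floordiv_eq_ediv_of_pos (by norm_num), Int.ediv_one]]
  | succ m ih =>
      rw [pvLoopB, dif_pos (one_le_pow₀ (by norm_num))]
      have h4 : PySem.Int.floordiv ((4 : Int) ^ (m + 1)) 4 = 4 ^ m := by
        rw [PySem.Int.floordiv_eq_ediv_of_pos (by norm_num), pow_succ,
          Int.mul_ediv_cancel _ (by norm_num)]
      rw [h4, ih, descDigits]
      simp

lemma pvPowB_inv (x : Int) (m : Nat) (h : (4 : Int) ^ m ≤ x) :
    ∃ m' : Nat, pvPowB x ((4 : Int) ^ m) = 4 ^ m' ∧ 4 ^ m' ≤ x ∧ x < 4 ^ (m' + 1) := by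
  have hpos : (0 : Int) < 4 ^ m := by positivity
  rw [pvPowB]
  by_cases hc : (4 : Int) ^ m * 4 ≤ x ∧ (0 : Int) < 4 ^ m
  · rw [dif_pos hc]
    have he : (4 : Int) ^ m * 4 = 4 ^ (m + 1) := by ring
    rw [he]
    exact pvPowB_inv x (m + 1) (he ▸ hc.1)
  · rw [dif_neg hc]
    have h2 : ¬ (4 : Int) ^ m * 4 ≤ x := fun hle => hc ⟨hle, hpos⟩
    exact ⟨m, rfl, h, by rw [pow_succ]; omega⟩
termination_by (x - 4 ^ m).toNat
decreasing_by
  have : (4 : Int) ^ m < 4 ^ (m + 1) := by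
    rw [pow_succ]; omega
  omega

lemma pvPowB_spec (x : Int) (hx : 0 < x) :
    ∃ m : Nat, pvPowB x 1 = 4 ^ m ∧ 4 ^ m ≤ x ∧ x < 4 ^ (m + 1) := by
  have := pvPowB_inv x 0 (by simpa using hx)
  simpa using this

lemma descDigits_eq_rev (m : Nat) : ∀ x : Int, 4 ^ m ≤ x → x < 4 ^ (m + 1) →
    descDigits x m = (lsbDigits x).reverse := by
  induction m with
  | zero =>
      intro x h1 h2
      simp only [pow_zero] at h1
      have hx : 0 < x := by omega
      have hq : PySem.Int.floordiv x 4 = 0 := by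
        rw [PySem.Int.floordiv_eq_ediv_of_pos (by norm_num)]
        exact Int.ediv_eq_zero_of_lt (by omega) (by norm_num at h2 ⊢; omega)
      rw [lsbDigits, dif_pos hx, hq, lsbDigits, dif_neg (by norm_num)]
      simp [descDigits]
  | succ m ih =>
      intro x h1 h2
      have hx : 0 < x := lt_of_lt_of_le (by positivity) h1
      have hlo : (4 : Int) ^ m ≤ PySem.Int.floordiv x 4 := by
        rw [PySem.Int.le_floordiv_iff_mul_le (by norm_num)]
        calc (4:Int)^m * 4 = 4^(m+1) := by ring
        _ ≤ x := h1
      have hhi : PySem.Int.floordiv x 4 < 4 ^ (m + 1) := by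
        rw [PySem.Int.floordiv_lt_iff_lt_mul (by norm_num)]
        calc x < 4^(m+1+1) := h2
        _ = 4^(m+1) * 4 := by ring
      rw [descDigits_succ x, ih _ hlo hhi,
        show lsbDigits x = PySem.Int.mod x 4 :: lsbDigits (PySem.Int.floordiv x 4) from by
          rw [lsbDigits, dif_pos hx]]
      simp

lemma toBase4_eq (x : Int) (hx : 0 ≤ x) : pvToBase4 x = pvNumberToBase x := by
  rcases eq_or_lt_of_le hx with h0 | hpos
  · subst h0
    have hp : pvPowB 0 1 = 1 := by rw [pvPowB]; norm_num
    have h14 : PySem.Int.floordiv (1 : Int) 4 = 0 := by decide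
    have h01 : PySem.Int.floordiv (0 : Int) 1 = 0 := by decide
    rw [pvToBase4, hp, pvLoopB, dif_pos (by norm_num), h14, h01,
      pvLoopB, dif_neg (by norm_num), pvNumberToBase, if_pos rfl]
    decide
  · obtain ⟨m, hpow, hlo, hhi⟩ := pvPowB_spec x hpos
    rw [pvToBase4, hpow, pvLoopB_pow, pvNumberToBase, if_neg (by omega), pvLoopA_eq]
    simpa using descDigits_eq_rev m x hlo hhi

-- ===== VERDICT (by name: the statement is the Claim_ definition above) =====
theorem ascii_to_dna_base_spec : Claim_equal_ascii_to_dna_base := by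
  intro xs _ hpre
  unfold Spec_ascii_to_dna_base ascii_to_dna_base ascii_to_dna_base_alt
  exact (List.map_congr_left (fun x hx => toBase4_eq x (hpre x hx))).symm
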